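-- pv_equiv track=rewrite | github.com/mikkotorma82-lgtm/pro_botti | bin/fix_capital_api.py | balance_triple_quotes
-- ===== SOURCE A (Python) =====
-- def balance_triple_quotes(text: str) -> str:
--     i, n = 0, len(text)
--     stack = []  # values: '"""' or "'''"
--     out = []
--     while i < n:
--         ch = text[i]
--         nxt3 = text[i:i+3]
--         if nxt3 in ('"""',"'''"):
--             if stack and stack[-1] == nxt3:
--                 stack.pop()
--             else:
--                 stack.append(nxt3)
--             out.append(nxt3)
--             i += 3
--             continue
--         out.append(ch)
--         i += 1
--     # jos jäi auki, sulje sama määrä kuin avattiin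
--     while stack:
--         out.append(stack.pop())
--     return "".join(out)
-- ===== SOURCE B (Python) =====
-- def balance_triple_quotes(text: str) -> str:
--     # Encode the left-to-right non-overlapping triple-quote tokens as letters.
--     word = []
--     i = 0
--     while i < len(text):
--         if text[i:i+3] == '"""':
--             word.append('a')
--             i += 3
--         elif text[i:i+3] == "'''":
--             word.append('b')
--             i += 3
--         else:
--             i += 1
--     s = ''.join(word)
--     # Cancel matching open/close pairs by deleting adjacent equal letter pairs to the
--     # unique normal form of the rewriting system (terminating and confluent, so the
--     # fixpoint is the reduced word of unclosed delimiters, leftmost-first).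
--     while 'aa' in s or 'bb' in s:
--         s = s.replace('aa', '').replace('bb', '')
--     # The text itself is emitted unchanged; close the open delimiters innermost-first.
--     return text + ''.join('"""' if c == 'a' else "'''" for c in reversed(s))
-- ===== Notes on version B (the rewrite author's own statement) =====
-- stated objective: alternative
-- what changed: B replaces A's single interleaved stack-scan that rebuilds the text with a rewriting algorithm: it encodes the triple-quote tokens as a two-letter word and repeatedly deletes adjacent equal letter pairs via str.replace until fixpoint (a terminating confluent rewriting system), then returns text plus the reversed normal form decoded back to delimiters.
import Mathlib
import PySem

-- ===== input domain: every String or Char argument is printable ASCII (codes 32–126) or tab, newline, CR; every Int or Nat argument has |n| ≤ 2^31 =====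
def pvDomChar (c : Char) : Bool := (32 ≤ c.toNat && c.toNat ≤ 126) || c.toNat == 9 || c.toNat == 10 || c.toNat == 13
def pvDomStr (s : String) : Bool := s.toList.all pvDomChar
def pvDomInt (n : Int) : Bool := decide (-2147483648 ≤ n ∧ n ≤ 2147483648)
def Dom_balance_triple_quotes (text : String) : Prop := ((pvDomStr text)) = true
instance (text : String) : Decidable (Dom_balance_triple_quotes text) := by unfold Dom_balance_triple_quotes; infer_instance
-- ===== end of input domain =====

-- B changes the algorithm: instead of A's single interleaved scan that rebuilds the
-- text and maintains a stack, B encodes the triple-quote tokens as a two-letter word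
-- and rewrites it to its normal form by repeatedly deleting adjacent equal letter pairs
-- (str.replace until fixpoint; terminating and confluent), then appends the reversed
-- normal form as closers. Same return value; same cost class is traded for clarity of spec.

-- ===== PORT A =====
-- A-side loop: stack holds tokens (head = top), out is the accumulated output.
def aLoop : List Char → List (List Char) → List Char → List Char
  | c1 :: c2 :: c3 :: rest, stack, out =>
    let t := [c1, c2, c3]
    if t = ['\"', '\"', '\"'] ∨ t = ['\'', '\'', '\''] then
      let stack' :=
        match stack with
        | s :: ss => if s = t then ss else t :: s :: ss
        | [] => [t]
      aLoop rest stack' (out ++ t)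
    else
      aLoop (c2 :: c3 :: rest) stack (out ++ [c1])
  | c :: rest, stack, out => aLoop rest stack (out ++ [c])
  | [], stack, out => out ++ stack.flatten

def balance_triple_quotes (text : String) : String :=
  String.ofList (aLoop text.toList [] [])

-- ===== PORT B =====
-- Source B pass 1: encode the left-to-right non-overlapping triple-quote tokens as letters.
def bTokenize : List Char → List Char
  | c1 :: c2 :: c3 :: rest =>
    if [c1, c2, c3] = ['\"', '\"', '\"'] then 'a' :: bTokenize rest
    else if [c1, c2, c3] = ['\'', '\'', '\''] then 'b' :: bTokenize rest
    else bTokenize (c2 :: c3 :: rest)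
  | _ => []

-- termination facts for bReduce's while loop (str.replace with empty replacement
-- never lengthens, strictly shortens when the pattern occurs, is identity otherwise)
lemma goLen (c : Char) : ∀ (fuel : Nat) (l acc : List Char),
    (PySem.Chars.replace.go [c, c] [] fuel l acc).length ≤ acc.length + l.length := by
  intro fuel
  induction fuel with
  | zero => intro l acc; simp [PySem.Chars.replace.go]
  | succ n ih =>
    intro l acc
    match l with
    | [] => simp [PySem.Chars.replace.go]
    | x :: t =>
      rw [PySem.Chars.replace.go]
      split
      · simp only [List.length_cons, List.length_nil, List.reverse_nil, List.nil_append]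
        have := ih (List.drop (0 + 1 + 1) (x :: t)) acc
        simp only [List.length_drop, List.length_cons] at this ⊢
        omega
      · have := ih t (x :: acc)
        simp only [List.length_cons] at *
        omega

lemma goEq (c : Char) : ∀ (fuel : Nat) (l acc : List Char), ¬ [c, c] <:+: l →
    PySem.Chars.replace.go [c, c] [] fuel l acc = acc.reverse ++ l := by
  intro fuel
  induction fuel with
  | zero => intro l acc _; simp [PySem.Chars.replace.go]
  | succ n ih =>
    intro l acc h
    match l with
    | [] => simp [PySem.Chars.replace.go]
    | x :: t =>
      rw [PySem.Chars.replace.go]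
      split
      · rename_i hp
        exact absurd (List.IsPrefix.isInfix (List.isPrefixOf_iff_prefix.mp hp)) h
      · have ht : ¬ [c, c] <:+: t := fun hi => h (hi.trans (List.suffix_cons x t).isInfix)
        rw [ih t (x :: acc) ht]
        simp

lemma goLt (c : Char) : ∀ (fuel : Nat) (l acc : List Char), l.length ≤ fuel → [c, c] <:+: l →
    (PySem.Chars.replace.go [c, c] [] fuel l acc).length + 2 ≤ acc.length + l.length := by
  intro fuel
  induction fuel with
  | zero =>
    intro l acc hf h
    have : l = [] := List.eq_nil_of_length_eq_zero (Nat.le_zero.mp hf)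
    subst this
    exfalso
    have := h.length_le
    simp at this
  | succ n ih =>
    intro l acc hf h
    match l with
    | [] => exfalso; have := h.length_le; simp at this
    | x :: t =>
      rw [PySem.Chars.replace.go]
      split
      · rename_i hp
        simp only [List.length_cons, List.length_nil, List.reverse_nil, List.nil_append]
        have := goLen c n (List.drop (0 + 1 + 1) (x :: t)) acc
        have hl : [c, c] <+: (x :: t) := List.isPrefixOf_iff_prefix.mp hp
        have h2 : 2 ≤ (x :: t).length := by
          have := hl.length_le; simpa using this
        simp only [List.length_drop, List.length_cons] at this h2 ⊢
        omega
      · rename_i hp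
        have ht : [c, c] <:+: t := by
          rcases (List.infix_cons_iff).mp h with h1 | h1
          · exact absurd (List.isPrefixOf_iff_prefix.mpr h1) hp
          · exact h1
        have := ih t (x :: acc) (by simp at hf; omega) ht
        simp only [List.length_cons] at *
        omega

lemma replace_length_le (c : Char) (s : List Char) :
    (PySem.Chars.replace s [c, c] []).length ≤ s.length := by
  have := goLen c s.length s []
  simpa [PySem.Chars.replace] using this

lemma replace_length_lt (c : Char) (s : List Char)
    (h : PySem.Chars.isIn [c, c] s = true) :
    (PySem.Chars.replace s [c, c] []).length + 2 ≤ s.length := by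
  have hi := (PySem.Chars.isIn_iff_infix _ _).mp h
  have := goLt c s.length s [] (le_refl _) hi
  simpa [PySem.Chars.replace] using this

lemma replace_eq_self (c : Char) (s : List Char)
    (h : PySem.Chars.isIn [c, c] s = false) :
    PySem.Chars.replace s [c, c] [] = s := by
  have hi := (PySem.Chars.isIn_eq_false_iff _ _).mp h
  have := goEq c s.length s [] hi
  simpa [PySem.Chars.replace] using this

-- Source B pass 2: delete adjacent equal letter pairs until no occurrence is left.
def bReduce (s : List Char) : List Char :=
  if (PySem.Chars.isIn ['a', 'a'] s || PySem.Chars.isIn ['b', 'b'] s) = true then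
    bReduce (PySem.Chars.replace (PySem.Chars.replace s ['a', 'a'] []) ['b', 'b'] [])
  else s
termination_by s.length
decreasing_by
  rename_i h
  rcases Bool.or_eq_true_iff.mp h with ha | hb
  · have h1 := replace_length_lt 'a' s ha
    have h2 := replace_length_le 'b' (PySem.Chars.replace s ['a', 'a'] [])
    omega
  · by_cases ha : PySem.Chars.isIn ['a', 'a'] s = true
    · have h1 := replace_length_lt 'a' s ha
      have h2 := replace_length_le 'b' (PySem.Chars.replace s ['a', 'a'] [])
      omega
    · rw [replace_eq_self 'a' s (by simpa using ha)]
      have := replace_length_lt 'b' s hb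
      omega

-- decoding of the letters back to delimiters (Source B's conditional inside the join)
def decode (c : Char) : List Char :=
  if c = 'a' then ['\"', '\"', '\"'] else ['\'', '\'', '\'']

def balance_triple_quotes_alt (text : String) : String :=
  String.ofList (text.toList ++ (bReduce (bTokenize text.toList)).reverse.flatMap decode)

-- ===== PRECONDITION & SPEC =====
def Spec_balance_triple_quotes (text : String) (out : String) : Prop := out = balance_triple_quotes_alt text
instance (text : String) (out : String) : Decidable (Spec_balance_triple_quotes text out) := by unfold Spec_balance_triple_quotes; infer_instance

-- ===== CLAIM (what is proved, stated in full; the proofs are below) =====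
def Claim_equal_balance_triple_quotes : Prop := ∀ (text : String), Dom_balance_triple_quotes text → Spec_balance_triple_quotes text (balance_triple_quotes text)

-- ===== LEMMAS AND PROOFS =====

-- characterization of A: tokens (as triples) and the stack step
def aTok : List Char → List (List Char)
  | c1 :: c2 :: c3 :: rest =>
    let t := [c1, c2, c3]
    if t = ['\"', '\"', '\"'] ∨ t = ['\'', '\'', '\''] then t :: aTok rest
    else aTok (c2 :: c3 :: rest)
  | _ => []

def stepA (stack : List (List Char)) (t : List Char) : List (List Char) :=
  match stack with
  | s :: ss => if s = t then ss else t :: s :: ss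
  | [] => [t]

-- letter-level stack step and pair-cancellation pass
def stepL (st : List Char) (c : Char) : List Char :=
  match st with
  | t :: ts => if t = c then ts else c :: t :: ts
  | [] => [c]

def rep (c : Char) : List Char → List Char
  | x :: y :: t => if x = c ∧ y = c then rep c t else x :: rep c (y :: t)
  | l => l

lemma aLoop_eq (cs : List Char) (stack : List (List Char)) (out : List Char) :
    aLoop cs stack out = out ++ cs ++ ((aTok cs).foldl stepA stack).flatten := by
  fun_induction aLoop cs stack out with
  | case1 c1 c2 c3 rest stack out t htok stack' ih =>
    simp only [aTok, t, htok, if_pos, List.foldl_cons] at *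
    rw [ih]
    have h : stepA stack [c1, c2, c3] = stack' := rfl
    rw [h]
    simp
  | case2 c1 c2 c3 rest stack out t htok ih =>
    simp only [aTok, t, htok] at *
    rw [ih]
    simp
  | case3 c rest stack out h ih =>
    cases rest with
    | nil => rw [ih]; simp [aTok]
    | cons d r2 =>
      cases r2 with
      | nil => rw [ih]; simp [aTok]
      | cons e r3 => exact absurd rfl (h d e r3)
  | case4 stack out => simp [aTok]

lemma aTok_eq (cs : List Char) : aTok cs = (bTokenize cs).map decode := by
  fun_induction bTokenize cs with
  | case1 c1 c2 c3 rest h ih =>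
    simp only [aTok, List.map_cons]
    rw [if_pos (Or.inl h), ih]
    simp [decode, h]
  | case2 c1 c2 c3 rest h1 h2 ih =>
    simp only [aTok, List.map_cons]
    rw [if_pos (Or.inr h2), ih]
    simp [decode, h2]
  | case3 c1 c2 c3 rest h1 h2 ih =>
    simp only [aTok]
    rw [if_neg (not_or.mpr ⟨h1, h2⟩), ih]
  | case4 l h =>
    match l, h with
    | [], _ => simp [aTok]
    | [x], _ => simp [aTok]
    | [x, y], _ => simp [aTok]
    | x :: y :: z :: t, h => exact absurd rfl (h x y z t)

def AB (c : Char) : Prop := c = 'a' ∨ c = 'b'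

lemma tok_ab (cs : List Char) : ∀ x ∈ bTokenize cs, AB x := by
  fun_induction bTokenize cs with
  | case1 c1 c2 c3 rest h ih =>
    intro x hx
    rw [List.mem_cons] at hx
    rcases hx with hx | hx
    · exact Or.inl hx
    · exact ih x hx
  | case2 c1 c2 c3 rest h1 h2 ih =>
    intro x hx
    rw [List.mem_cons] at hx
    rcases hx with hx | hx
    · exact Or.inr hx
    · exact ih x hx
  | case3 _ _ _ _ _ _ ih => exact ih
  | case4 l h => simp

lemma decode_inj {x y : Char} (hx : AB x) (hy : AB y) (h : decode x = decode y) : x = y := by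
  rcases hx with hx | hx <;> rcases hy with hy | hy <;> subst hx <;> subst hy <;> simp_all [decode]

lemma stepL_ab {st : List Char} {c : Char} (hst : ∀ x ∈ st, AB x) (hc : AB c) :
    ∀ x ∈ stepL st c, AB x := by
  match st with
  | [] => intro x hx; simp [stepL] at hx; subst hx; exact hc
  | t :: ts =>
    intro x hx
    simp only [stepL] at hx
    split at hx
    · exact hst x (List.mem_cons_of_mem t hx)
    · rw [List.mem_cons] at hx
      rcases hx with hx | hx
      · subst hx; exact hc
      · exact hst x hx

lemma foldA_map : ∀ (w : List Char) (st : List Char), (∀ x ∈ st, AB x) → (∀ x ∈ w, AB x) →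
    (w.map decode).foldl stepA (st.map decode) = (w.foldl stepL st).map decode := by
  intro w
  induction w with
  | nil => intro st _ _; simp
  | cons c t ih =>
    intro st hst hw
    have hc : AB c := hw c (List.mem_cons_self)
    have hstep : stepA (st.map decode) (decode c) = (stepL st c).map decode := by
      match st with
      | [] => simp [stepA, stepL]
      | s :: ss =>
        simp only [stepA, stepL, List.map_cons]
        by_cases h : s = c
        · subst h; simp
        · rw [if_neg (fun hd => h (decode_inj (hst s List.mem_cons_self) hc hd)), if_neg h]
          simp
    simp only [List.map_cons, List.foldl_cons, hstep]
    exact ih (stepL st c) (stepL_ab hst hc) (fun x hx => hw x (List.mem_cons_of_mem c hx))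

-- replace with pattern [c,c] and empty replacement is the pair-cancellation pass rep
lemma go_spec (c : Char) : ∀ (fuel : Nat) (l acc : List Char), l.length ≤ fuel →
    PySem.Chars.replace.go [c, c] [] fuel l acc = acc.reverse ++ rep c l := by
  intro fuel
  induction fuel with
  | zero =>
    intro l acc h
    have : l = [] := List.eq_nil_of_length_eq_zero (Nat.le_zero.mp h)
    subst this
    simp [PySem.Chars.replace.go, rep]
  | succ n ih =>
    intro l acc h
    match l with
    | [] => simp [PySem.Chars.replace.go, rep]
    | x :: t =>
      rw [PySem.Chars.replace.go]
      split
      · rename_i hp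
        have hpre := List.isPrefixOf_iff_prefix.mp hp
        match t, hpre with
        | y :: t', hpre =>
          have hx : x = c ∧ y = c := by
            have := (List.cons_prefix_cons).mp hpre
            have h2 := (List.cons_prefix_cons).mp this.2
            exact ⟨this.1.symm, h2.1.symm⟩
          show PySem.Chars.replace.go [c, c] [] n t' acc = acc.reverse ++ rep c (x :: y :: t')
          rw [ih t' acc (by simp at h; omega)]
          simp only [rep]
          rw [if_pos hx]
      · rename_i hp
        have hx : ¬(x = c ∧ (t.head?.getD c = c ∧ t ≠ [])) := by
          intro ⟨h1, h2, h3⟩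
          apply hp
          match t, h3 with
          | y :: t', _ =>
            simp at h2
            apply List.isPrefixOf_iff_prefix.mpr
            rw [h1, h2]
            simp
        rw [ih t (x :: acc) (by simp at h ⊢; omega)]
        match t with
        | [] => simp [rep]
        | y :: t' =>
          have : ¬(x = c ∧ y = c) := by
            intro ⟨h1, h2⟩; exact hx ⟨h1, by simp [h2], by simp⟩
          rw [rep, if_neg this]
          simp

lemma replace_cc (c : Char) (s : List Char) :
    PySem.Chars.replace s [c, c] [] = rep c s := by
  have := go_spec c s.length s [] (le_refl _)
  simpa [PySem.Chars.replace] using this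

lemma stepL_chain {st : List Char} (h : List.IsChain Ne st) (c : Char) : List.IsChain Ne (stepL st c) := by
  match st with
  | [] => simp [stepL]
  | t :: ts =>
    simp only [stepL]
    split
    · exact h.tail
    · rename_i hne
      exact List.isChain_cons_cons.mpr ⟨fun he => hne he.symm, h⟩

lemma stepL_twice {st : List Char} (h : List.IsChain Ne st) (c : Char) :
    stepL (stepL st c) c = st := by
  match st with
  | [] => simp [stepL]
  | t :: ts =>
    simp only [stepL]
    by_cases ht : t = c
    · subst ht
      rw [if_pos rfl]
      match ts with
      | [] => rfl
      | u :: us =>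
        have hut : ¬ u = t := fun he => (List.isChain_cons_cons.mp h).1 he.symm
        simp [stepL, hut]
    · rw [if_neg ht]
      simp [stepL]

lemma foldl_rep (c : Char) : ∀ (w st : List Char), List.IsChain Ne st →
    (rep c w).foldl stepL st = w.foldl stepL st := by
  intro w
  fun_induction rep c w with
  | case1 x y t hxy ih =>
    intro st hst
    obtain ⟨hx, hy⟩ := hxy
    subst hx; subst hy
    simp only [List.foldl_cons]
    rw [ih st hst, stepL_twice hst]
  | case2 x y t hxy ih =>
    intro st hst
    simp only [List.foldl_cons]
    exact ih (stepL st x) (stepL_chain hst x)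
  | case3 l h =>
    intro st _; rfl

lemma bReduce_foldl : ∀ (w : List Char), (bReduce w).foldl stepL [] = w.foldl stepL [] := by
  intro w
  fun_induction bReduce w with
  | case1 w h ih =>
    rw [ih]
    rw [replace_cc, replace_cc]
    rw [foldl_rep 'b' _ [] List.isChain_nil, foldl_rep 'a' _ [] List.isChain_nil]
  | case2 w h => rfl

lemma rep_subset (c : Char) : ∀ (w : List Char), ∀ x ∈ rep c w, x ∈ w := by
  intro w
  fun_induction rep c w with
  | case1 x y t hxy ih =>
    intro z hz
    exact List.mem_cons_of_mem x (List.mem_cons_of_mem y (ih z hz))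
  | case2 x y t hxy ih =>
    intro z hz
    rw [List.mem_cons] at hz
    rcases hz with hz | hz
    · exact hz ▸ List.mem_cons_self
    · exact List.mem_cons_of_mem x (ih z hz)
  | case3 l h => intro z hz; exact hz

lemma bReduce_ab : ∀ (w : List Char), (∀ x ∈ w, AB x) → ∀ x ∈ bReduce w, AB x := by
  intro w
  fun_induction bReduce w with
  | case1 w h ih =>
    intro hw x hx
    have := ih (by
      intro y hy
      rw [replace_cc, replace_cc] at hy
      exact hw y (rep_subset 'a' w y (rep_subset 'b' _ y hy))) x hx
    exact this
  | case2 w h => intro hw x hx; exact hw x hx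

lemma bReduce_fix : ∀ (w : List Char),
    PySem.Chars.isIn ['a', 'a'] (bReduce w) = false ∧ PySem.Chars.isIn ['b', 'b'] (bReduce w) = false := by
  intro w
  fun_induction bReduce w with
  | case1 w h ih => exact ih
  | case2 w h =>
    simp only [Bool.or_eq_true, not_or] at h
    exact ⟨Bool.eq_false_iff.mpr h.1, Bool.eq_false_iff.mpr h.2⟩

lemma chain_of_noinfix : ∀ (s : List Char), (∀ x ∈ s, AB x) →
    ¬ ['a', 'a'] <:+: s → ¬ ['b', 'b'] <:+: s → List.IsChain Ne s := by
  intro s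
  induction s with
  | nil => intro _ _ _; simp
  | cons x t ih =>
    intro hab ha hb
    match t with
    | [] => simp
    | y :: t' =>
      refine List.isChain_cons_cons.mpr ⟨?_, ?_⟩
      · intro he
        subst he
        rcases hab x List.mem_cons_self with h | h
        · subst h; exact ha ⟨[], t', by simp⟩
        · subst h; exact hb ⟨[], t', by simp⟩
      · exact ih (fun z hz => hab z (List.mem_cons_of_mem x hz))
          (fun hi => ha (hi.trans (List.suffix_cons x _).isInfix))
          (fun hi => hb (hi.trans (List.suffix_cons x _).isInfix))

lemma foldl_of_chain : ∀ (s st : List Char), List.IsChain Ne s →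
    (∀ x h, s.head? = some x → st.head? = some h → x ≠ h) →
    s.foldl stepL st = s.reverse ++ st := by
  intro s
  induction s with
  | nil => intro st _ _; simp
  | cons c t ih =>
    intro st hch hh
    have hstep : stepL st c = c :: st := by
      match st with
      | [] => simp [stepL]
      | h :: hs =>
        have : ¬ h = c := fun he => hh c h rfl rfl he.symm
        simp [stepL, this]
    simp only [List.foldl_cons, hstep]
    rw [ih (c :: st) hch.tail ?_]
    · simp
    · intro x h hx hhd
      simp at hhd
      subst hhd
      match t, hx with
      | y :: t', hx =>
        simp at hx
        subst hx
        exact fun he => (List.isChain_cons_cons.mp hch).1 he.symm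

lemma bReduce_eq_reverse (w : List Char) (hab : ∀ x ∈ w, AB x) :
    bReduce w = (w.foldl stepL []).reverse := by
  have hfix := bReduce_fix w
  have hch : List.IsChain Ne (bReduce w) :=
    chain_of_noinfix (bReduce w) (bReduce_ab w hab)
      ((PySem.Chars.isIn_eq_false_iff _ _).mp hfix.1)
      ((PySem.Chars.isIn_eq_false_iff _ _).mp hfix.2)
  have h1 := foldl_of_chain (bReduce w) [] hch (by intro x h _ hh; simp at hh)
  have h2 := bReduce_foldl w
  rw [h1] at h2
  simp at h2
  rw [← h2]
  simp

-- ===== VERDICT (by name: the statement is the Claim_ definition above) =====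
theorem balance_triple_quotes_spec : Claim_equal_balance_triple_quotes := by
  intro text _
  unfold Spec_balance_triple_quotes balance_triple_quotes balance_triple_quotes_alt
  rw [aLoop_eq]
  congr 1
  simp only [List.nil_append, List.append_cancel_left_eq]
  rw [aTok_eq]
  have h := foldA_map (bTokenize text.toList) [] (by simp) (tok_ab text.toList)
  simp only [List.map_nil] at h
  rw [h]
  rw [bReduce_eq_reverse (bTokenize text.toList) (tok_ab text.toList)]
  simp [List.flatMap_def]
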